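-- pv_equiv track=rewrite | github.com/lkwq007/leetcode-py | 1498-Number-of-Subsequences-That-Satisfy.py | numSubseq
-- ===== SOURCE A (Python) =====
-- from typing import List
--
-- def numSubseq(nums: List[int], target: int) -> int:
--     record={}
--     for item in nums:
--         record[item]=record.get(item,0)+1
--     lst=sorted(record.keys())
--     prefix=[0]*(len(lst)+1)
--     for i in range(len(lst)):
--         prefix[i]=prefix[i-1]+record[lst[i]]
--     left=0
--     right=len(lst)-1
--     term=10**9+7
--     ret=0
--     while left<=right:
--         cur=lst[left]
--         if cur+cur>target:
--             break
--         while cur+lst[right]>target: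
--             right-=1
--         total=prefix[right]-prefix[left]
--         ret+=pow(2,total,term)*(pow(2,record[lst[left]],term)-1)
--         ret%=term
--         left+=1
--     return ret
-- ===== SOURCE B (Python) =====
-- def numSubseq(nums, target):
--     MOD = 10**9 + 7
--     s = sorted(nums)
--     n = len(s)
--     pows = [1]
--     for _ in range(n):
--         pows.append(pows[-1] * 2 % MOD)
--     ans = 0
--     left, right = 0, n - 1
--     while left <= right:
--         if s[left] + s[right] > target:
--             right -= 1
--         else:
--             ans = (ans + pows[right - left]) % MOD
--             left += 1
--     return ans
-- ===== Notes on version B (the rewrite author's own statement) =====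
-- stated objective: simpler
-- what changed: Replaces the frequency dict, sorted distinct-key list, negative-index prefix-count table and per-group pow(2,total,M)*(pow(2,c,M)-1) arithmetic by a flat sorted copy of nums, a power-of-two table built once by appending, and a single element-wise two-pointer scan adding pows[right-left] per left; nums is not mutated (neither version mutates it).
import Mathlib
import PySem

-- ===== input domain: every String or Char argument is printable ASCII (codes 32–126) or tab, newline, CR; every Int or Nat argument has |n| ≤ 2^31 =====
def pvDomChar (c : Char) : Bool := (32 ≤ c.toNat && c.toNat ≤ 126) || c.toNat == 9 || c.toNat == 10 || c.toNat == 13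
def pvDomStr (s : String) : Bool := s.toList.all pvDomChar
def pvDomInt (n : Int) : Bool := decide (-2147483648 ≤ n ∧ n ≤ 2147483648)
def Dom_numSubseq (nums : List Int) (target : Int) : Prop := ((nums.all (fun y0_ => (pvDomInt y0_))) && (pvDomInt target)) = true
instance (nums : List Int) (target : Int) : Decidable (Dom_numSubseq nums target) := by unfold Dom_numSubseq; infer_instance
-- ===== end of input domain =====

-- B replaces A's frequency dict + distinct-key prefix-count table + per-group arithmetic by a flat
-- sorted copy, an appended power-of-two table and an element-wise two-pointer scan (same cost class).


-- ===== PORT A =====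
def pvP : Int := 1000000007

-- inner 'while cur+lst[right]>target: right-=1'; Python indexes lst[right] (negative wrap via pyGet?);
-- the 'none' arm is Python's IndexError, unreachable in any run A completes
def aInner (lst : List Int) (target cur : Int) (right : Int) : Int :=
  match h : PySem.List.pyGet? lst right with
  | none => right
  | some x => if cur + x > target then aInner lst target cur (right - 1) else right
termination_by (right + lst.length + 1).toNat
decreasing_by
  have hr : PySem.Raise.InRange lst.length right := by
    by_contra hc
    rw [← PySem.List.pyGet?_eq_none_iff] at hc
    simp [hc] at h
  simp [PySem.Raise.InRange] at hr
  omega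

theorem aInner_le (lst : List Int) (target cur right : Int) :
    aInner lst target cur right ≤ right := by
  fun_induction aInner lst target cur right with
  | case1 => omega
  | case2 => omega
  | case3 h x hx ih => omega

-- outer while loop of A
def aLoop (lst : List Int) (record : PySem.Dict Int Int) (pre : List Int) (target : Int)
    (left right ret : Int) : Int :=
  if _h : left ≤ right then
    let cur := PySem.List.pyGetD lst left 0
    if cur + cur > target then ret
    else
      let right' := aInner lst target cur right
      let total := PySem.List.pyGetD pre right' 0 - PySem.List.pyGetD pre left 0
      -- total ≥ 0 and record contains cur in every run, so pow(2, ·, term) is powMod on the Nat value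
      let ret' := PySem.Int.mod
        (ret + PySem.Int.powMod 2 total.toNat pvP * (PySem.Int.powMod 2 (record.getD cur 0).toNat pvP - 1)) pvP
      aLoop lst record pre target (left + 1) right' ret'
  else ret
termination_by (right + 1 - left).toNat
decreasing_by
  have := aInner_le lst target (PySem.List.pyGetD lst left 0) right
  omega

def numSubseq (nums : List Int) (target : Int) : Int :=
  let record := nums.foldl (fun d item => d.insert item (d.getD item 0 + 1)) PySem.Dict.empty
  let lst := PySem.List.sorted record.keys (fun x => x) false
  -- prefix[i] = prefix[i-1] + record[lst[i]] over a zero list of length len+1 (prefix[-1] reads the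
  -- final, never-written slot); record[·] is getD (the key is always present)
  let pre := (PySem.List.pyRange 0 (lst.length : Int) 1).foldl
      (fun pf i => PySem.List.pySetD pf i
        (PySem.List.pyGetD pf (i - 1) 0 + record.getD (PySem.List.pyGetD lst i 0) 0))
      (List.replicate (lst.length + 1) 0)
  aLoop lst record pre target 0 ((lst.length : Int) - 1) 0

-- ===== PORT B =====
def altLoop (s pows : List Int) (target : Int) (left right ans : Int) : Int :=
  if _h : left ≤ right then
    if PySem.List.pyGetD s left 0 + PySem.List.pyGetD s right 0 > target then
      altLoop s pows target left (right - 1) ans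
    else
      altLoop s pows target (left + 1) right
        (PySem.Int.mod (ans + PySem.List.pyGetD pows (right - left) 0) pvP)
  else ans
termination_by (right + 1 - left).toNat

def numSubseq_alt (nums : List Int) (target : Int) : Int :=
  let s := PySem.List.sorted nums (fun x => x) false
  let n := s.length
  let pows := (List.range n).foldl
      (fun pf _ => pf ++ [PySem.Int.mod (PySem.List.pyGetD pf (-1) 0 * 2) pvP]) [1]
  altLoop s pows target 0 ((n : Int) - 1) 0

-- ===== PRECONDITION & SPEC =====
def Spec_numSubseq (nums : List Int) (target : Int) (out : Int) : Prop := out = numSubseq_alt nums target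
instance (nums : List Int) (target : Int) (out : Int) : Decidable (Spec_numSubseq nums target out) := by unfold Spec_numSubseq; infer_instance

-- ===== CLAIM (what is proved, stated in full; the proofs are below) =====
def Claim_equal_numSubseq : Prop := ∀ (nums : List Int) (target : Int), Dom_numSubseq nums target → Spec_numSubseq nums target (numSubseq nums target)

-- ===== LEMMAS AND PROOFS =====

-- number of elements x of s with v + x ≤ t
def pvCnt (s : List Int) (t v : Int) : Nat := s.countP (fun x => decide (v + x ≤ t))

-- the contribution of flat sorted index l: 2^(pvCnt-1-l) when l is a valid minimum position
def pvTerm (s : List Int) (t : Int) (l : Nat) : Int :=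
  if l + 1 ≤ pvCnt s t (s.getD l 0) then 2 ^ (pvCnt s t (s.getD l 0) - 1 - l) else 0

-- sum of contributions of indices a, a+1, …, s.length-1 (the common hub both ports reach, mod pvP)
def pvE (s : List Int) (t : Int) (a : Nat) : Int := ((List.range' a (s.length - a)).map (pvTerm s t)).sum

theorem pvP_pos : (0 : Int) < pvP := by norm_num [pvP]

-- on a nondecreasing list the positions satisfying v + s[j] ≤ t are exactly the first pvCnt ones
theorem countP_iff_lt {s : List Int} (hs : List.Pairwise (· ≤ ·) s) (v t : Int) :
    ∀ j : Nat, j < s.length → ((v + s.getD j 0 ≤ t) ↔ j < pvCnt s t v) := by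
  induction s with
  | nil => intro j hj; simp at hj
  | cons x xs ih =>
    rw [List.pairwise_cons] at hs
    intro j hj
    unfold pvCnt
    rw [List.countP_cons]
    by_cases hx : v + x ≤ t
    · rw [if_pos (decide_eq_true hx)]
      cases j with
      | zero => rw [List.getD_cons_zero]; omega
      | succ j =>
        have h := ih hs.2 j (by simpa using hj)
        unfold pvCnt at h
        rw [List.getD_cons_succ, h]
        omega
    · have h0 : xs.countP (fun y => decide (v + y ≤ t)) = 0 := by
        rw [List.countP_eq_zero]
        intro a ha
        have := hs.1 a ha
        simp
        omega
      rw [if_neg (by simpa using hx), h0]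
      cases j with
      | zero => rw [List.getD_cons_zero]; omega
      | succ j =>
        have hjl : j < xs.length := by simpa using hj
        have hmem : xs.getD j 0 ∈ xs := by
          rw [List.getD_eq_getElem _ _ hjl]; exact List.getElem_mem hjl
        have := hs.1 _ hmem
        rw [List.getD_cons_succ]
        omega

theorem pvGetD_mono {s : List Int} (hs : List.Pairwise (· ≤ ·) s) {i j : Nat}
    (hij : i ≤ j) (hj : j < s.length) : s.getD i 0 ≤ s.getD j 0 := by
  rcases Nat.eq_or_lt_of_le hij with rfl | hlt
  · exact le_refl _
  · rw [List.getD_eq_getElem _ _ (lt_trans hlt hj), List.getD_eq_getElem _ _ hj]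
    exact List.pairwise_iff_getElem.mp hs i j _ hj hlt

theorem pvCnt_anti (s : List Int) (t : Int) {v w : Int} (hvw : v ≤ w) :
    pvCnt s t w ≤ pvCnt s t v := by
  apply List.countP_mono_left
  intro x _ h
  simp at h ⊢
  omega

theorem pvE_zero_from {s : List Int} (hs : List.Pairwise (· ≤ ·) s) (t : Int) {a : Nat}
    (ha : a < s.length) (h : pvCnt s t (s.getD a 0) ≤ a) : pvE s t a = 0 := by
  unfold pvE
  apply List.sum_eq_zero
  intro x hx
  rw [List.mem_map] at hx
  obtain ⟨l, hl, rfl⟩ := hx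
  rw [List.mem_range'_1] at hl
  have h1 : pvCnt s t (s.getD l 0) ≤ pvCnt s t (s.getD a 0) :=
    pvCnt_anti s t (pvGetD_mono hs hl.1 (by omega))
  unfold pvTerm
  rw [if_neg (by omega)]

theorem pvE_cons {s : List Int} (t : Int) {a : Nat} (ha : a < s.length) :
    pvE s t a = pvTerm s t a + pvE s t (a + 1) := by
  unfold pvE
  have h1 : s.length - a = (s.length - (a + 1)) + 1 := by omega
  rw [h1, List.range'_succ]
  simp

theorem pvMod_step (a b X : Int) :
    ((a + b % pvP) % pvP + X) % pvP = (a + (b + X)) % pvP := by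
  have h1 : ((a + b % pvP) % pvP + X) % pvP = ((a + b % pvP) + X) % pvP :=
    Int.ModEq.add_right X (Int.emod_emod _ _)
  have h2 : ((a + b % pvP) + X) % pvP = ((a + b) + X) % pvP :=
    Int.ModEq.add_right X (Int.ModEq.add_left a (Int.emod_emod _ _))
  rw [h1, h2, add_assoc]

theorem pvMod_step2 (r a c E : Int) :
    ((r + (a % pvP) * (c % pvP - 1)) % pvP + E) % pvP = (r + (a * (c - 1) + E)) % pvP := by
  have hmul : (a % pvP) * (c % pvP - 1) ≡ a * (c - 1) [ZMOD pvP] :=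
    Int.ModEq.mul (Int.emod_emod _ _) (Int.ModEq.sub_right 1 (Int.emod_emod _ _))
  have h1 : ((r + (a % pvP) * (c % pvP - 1)) % pvP + E) % pvP
      = ((r + (a % pvP) * (c % pvP - 1)) + E) % pvP :=
    Int.ModEq.add_right E (Int.emod_emod _ _)
  have h2 : ((r + (a % pvP) * (c % pvP - 1)) + E) % pvP = ((r + a * (c - 1)) + E) % pvP :=
    Int.ModEq.add_right E (Int.ModEq.add_left r hmul)
  rw [h1, h2, add_assoc]

theorem pows_spec (n : Nat) :
    (List.range n).foldl
      (fun pf _ => pf ++ [PySem.Int.mod (PySem.List.pyGetD pf (-1) 0 * 2) pvP]) [1]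
    = (List.range (n + 1)).map (fun k => (2 : Int) ^ k % pvP) := by
  induction n with
  | zero => norm_num [pvP]
  | succ n ih =>
    rw [List.range_succ, List.foldl_append, ih]
    simp only [List.foldl_cons, List.foldl_nil]
    rw [List.range_succ (n := n + 1), List.map_append]
    congr 1
    rw [List.range_succ (n := n), List.map_append]
    simp only [List.map_cons, List.map_nil]
    simp only [PySem.List.pyGetD, PySem.List.pyGet?_neg_one_append_singleton, Option.getD_some]
    rw [PySem.Int.mod_eq_emod_of_pos pvP_pos]
    rw [Int.mul_emod, Int.emod_emod, ← Int.mul_emod, pow_succ]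

theorem pows_getD (n k : Nat) (hk : k ≤ n) :
    ((List.range (n + 1)).map (fun k => (2 : Int) ^ k % pvP)).getD k 0 = 2 ^ k % pvP := by
  rw [List.getD_eq_getElem?_getD, List.getElem?_map, List.getElem?_range (by omega)]
  rfl

-- if the loop is entered with the right pointer at least pvCnt(s[l])-1 and everything above it
-- already rejected, it returns (ans + remaining contributions) mod pvP
theorem altLoop_spec (s pows : List Int) (t : Int) (hs : List.Pairwise (· ≤ ·) s)
    (hpows : ∀ k : Nat, k ≤ s.length → pows.getD k 0 = 2 ^ k % pvP) :
    ∀ (m : Nat) (l r ans : Int), (r + 1 - l).toNat ≤ m →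
      0 ≤ l → r < (s.length : Int) → l ≤ r + 1 →
      (l < (s.length : Int) → (pvCnt s t (s.getD l.toNat 0) : Int) - 1 ≤ r) →
      ans % pvP = ans →
      altLoop s pows t l r ans = (ans + pvE s t l.toNat) % pvP := by
  have exit : ∀ (l r : Int), 0 ≤ l → r < (s.length : Int) → r < l →
      (l < (s.length : Int) → (pvCnt s t (s.getD l.toNat 0) : Int) - 1 ≤ r) →
      pvE s t l.toNat = 0 := by
    intro l r hl hr hgt hinv
    by_cases hln : l < (s.length : Int)
    · exact pvE_zero_from hs t (by omega) (by have := hinv hln; omega)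
    · unfold pvE
      rw [show s.length - l.toNat = 0 by omega]
      simp
  intro m
  induction m with
  | zero =>
    intro l r ans hm hl hr hlr hinv hans
    rw [altLoop, dif_neg (by omega)]
    rw [exit l r hl hr (by omega) hinv, add_zero, hans]
  | succ m ih =>
    intro l r ans hm hl hr hlr hinv hans
    rw [altLoop]
    by_cases hguard : l ≤ r
    · rw [dif_pos hguard]
      have hr0 : 0 ≤ r := by omega
      have hlen : l < (s.length : Int) := by omega
      rw [PySem.List.pyGetD_of_nonneg _ _ hl, PySem.List.pyGetD_of_nonneg _ _ hr0]
      have hcharR := countP_iff_lt hs (s.getD l.toNat 0) t r.toNat (by omega)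
      by_cases hcond : s.getD l.toNat 0 + s.getD r.toNat 0 > t
      · rw [if_pos hcond]
        apply ih _ _ _ (by omega) hl (by omega) (by omega) _ hans
        intro _
        have : ¬ (r.toNat < pvCnt s t (s.getD l.toNat 0)) := fun hc => by
          have := hcharR.mpr hc; omega
        omega
      · rw [if_neg hcond]
        have h1 : r.toNat < pvCnt s t (s.getD l.toNat 0) := hcharR.mp (by omega)
        have h2 : (pvCnt s t (s.getD l.toNat 0) : Int) - 1 ≤ r := hinv hlen
        have hreq : (pvCnt s t (s.getD l.toNat 0) : Int) = r + 1 := by omega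
        have hlcnt : l.toNat < pvCnt s t (s.getD l.toNat 0) := by
          apply (countP_iff_lt hs _ t l.toNat (by omega)).mp
          have := pvGetD_mono hs (show l.toNat ≤ r.toNat by omega) (show r.toNat < s.length by omega)
          omega
        rw [PySem.List.pyGetD_of_nonneg _ _ (show (0:Int) ≤ r - l by omega)]
        rw [hpows (r - l).toNat (by omega)]
        rw [PySem.Int.mod_eq_emod_of_pos pvP_pos]
        rw [ih (l + 1) r _ (by omega) (by omega) hr (by omega) _ (Int.emod_emod _ _)]
        · rw [pvMod_step]
          rw [show (l + 1).toNat = l.toNat + 1 by omega]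
          rw [pvE_cons t (show l.toNat < s.length by omega)]
          unfold pvTerm
          rw [if_pos (by omega)]
          rw [show (r - l).toNat = pvCnt s t (s.getD l.toNat 0) - 1 - l.toNat by omega]
        · intro hl1
          have hmono : pvCnt s t (s.getD (l+1).toNat 0) ≤ pvCnt s t (s.getD l.toNat 0) := by
            apply pvCnt_anti
            exact pvGetD_mono hs (show l.toNat ≤ (l+1).toNat by omega) (by omega)
          omega
    · rw [dif_neg hguard]
      rw [exit l r hl hr (by omega) hinv, add_zero, hans]

theorem alt_eq (nums : List Int) (target : Int) :
    numSubseq_alt nums target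
      = pvE (PySem.List.sorted nums (fun x => x) false) target 0 % pvP := by
  have hs : List.Pairwise (· ≤ ·) (PySem.List.sorted nums (fun x => x) false) := by
    simpa using PySem.List.sorted_pairwise nums (fun x => x)
  have hcnt : ∀ v : Int, pvCnt (PySem.List.sorted nums (fun x => x) false) target v ≤
      (PySem.List.sorted nums (fun x => x) false).length := fun v => List.countP_le_length
  unfold numSubseq_alt
  simp only []
  rw [pows_spec]
  rw [altLoop_spec _ _ target hs (fun k hk => pows_getD _ k hk)
      ((PySem.List.sorted nums (fun x => x) false).length) 0
      ((((PySem.List.sorted nums (fun x => x) false)).length : Int) - 1) 0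
      (by omega) (by omega) (by omega) (by omega)
      (fun h => by have := hcnt (List.getD (PySem.List.sorted nums (fun x => x) false) (Int.toNat 0) 0); omega)
      (by norm_num)]
  simp


-- ---- A-side machinery: distinct sorted values lst with multiplicities from nums ----

-- number of elements of nums lying in the first L groups
def pvCC (lst nums : List Int) (L : Nat) : Nat := ((lst.take L).map (fun v => nums.count v)).sum

-- the flat sorted list rebuilt from groups
def pvFlat (lst nums : List Int) : List Int := lst.flatMap (fun v => List.replicate (nums.count v) v)

theorem pvCC_zero (lst nums : List Int) : pvCC lst nums 0 = 0 := rfl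

theorem pvCC_succ (lst nums : List Int) {L : Nat} (hL : L < lst.length) :
    pvCC lst nums (L + 1) = pvCC lst nums L + nums.count (lst.getD L 0) := by
  unfold pvCC
  rw [List.take_succ_eq_append_getElem hL, List.map_append, List.sum_append,
    List.getD_eq_getElem _ _ hL]
  simp

theorem pvCC_step (lst nums : List Int) (L : Nat) :
    pvCC lst nums L ≤ pvCC lst nums (L + 1) := by
  by_cases hL : L < lst.length
  · rw [pvCC_succ lst nums hL]; omega
  · unfold pvCC
    rw [List.take_of_length_le (by omega), List.take_of_length_le (by omega)]

theorem pvCC_mono (lst nums : List Int) {L M : Nat} (h : L ≤ M) :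
    pvCC lst nums L ≤ pvCC lst nums M := by
  induction M with
  | zero => have : L = 0 := by omega
            subst this; exact le_refl _
  | succ M ihM =>
    rcases Nat.lt_or_ge L (M + 1) with hlt | hge
    · exact le_trans (ihM (by omega)) (pvCC_step lst nums M)
    · have : L = M + 1 := by omega
      subst this; exact le_refl _

theorem pvCC_top (lst nums : List Int) {L : Nat} (h : lst.length ≤ L) :
    pvCC lst nums L = pvCC lst nums lst.length := by
  unfold pvCC
  rw [List.take_of_length_le h, List.take_of_length_le (le_refl _)]

theorem pvFlat_length (lst nums : List Int) :
    (pvFlat lst nums).length = pvCC lst nums lst.length := by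
  unfold pvFlat pvCC
  rw [List.length_flatMap, List.take_of_length_le (le_refl _)]
  simp

theorem pvFlat_take_length (lst nums : List Int) (L : Nat) :
    ((lst.take L).flatMap (fun v => List.replicate (nums.count v) v)).length
      = pvCC lst nums L := by
  unfold pvCC
  rw [List.length_flatMap]
  simp

theorem pvFlat_count (nums : List Int) :
    ∀ (lst : List Int), lst.Nodup →
      ∀ w, (pvFlat lst nums).count w = if w ∈ lst then nums.count w else 0 := by
  intro lst
  induction lst with
  | nil => intro _ w; simp [pvFlat]
  | cons v tail ih =>
    intro hnd w
    rw [List.nodup_cons] at hnd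
    unfold pvFlat
    rw [List.flatMap_cons, List.count_append]
    have htail := ih hnd.2 w
    unfold pvFlat at htail
    rw [htail, List.count_replicate]
    by_cases hv : w = v
    · subst hv
      simp [hnd.1]
    · by_cases hw : w ∈ tail
      · simp [hv, hw]
        intro h; exact absurd h.symm hv
      · simp [hv, hw]
        intro h; exact absurd h.symm hv

theorem pvFlat_perm (lst nums : List Int) (hnd : lst.Nodup)
    (hmem : ∀ v, v ∈ lst ↔ v ∈ nums) : (pvFlat lst nums).Perm nums := by
  apply List.perm_iff_count.mpr
  intro w
  rw [pvFlat_count nums lst hnd w]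
  by_cases hw : w ∈ lst
  · rw [if_pos hw]
  · rw [if_neg hw]
    have : w ∉ nums := fun h => hw ((hmem w).mpr h)
    exact (List.count_eq_zero.mpr this).symm

theorem pvFlat_pairwise (lst nums : List Int) (hle : lst.Pairwise (· ≤ ·)) :
    (pvFlat lst nums).Pairwise (· ≤ ·) := by
  induction lst with
  | nil => simp [pvFlat]
  | cons v tail ih =>
    rw [List.pairwise_cons] at hle
    unfold pvFlat
    rw [List.flatMap_cons, List.pairwise_append]
    refine ⟨List.pairwise_replicate.mpr (Or.inr (le_refl v)), ih hle.2, ?_⟩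
    intro a ha b hb
    rw [List.eq_of_mem_replicate ha]
    rw [List.mem_flatMap] at hb
    obtain ⟨u, hu, hbu⟩ := hb
    rw [List.eq_of_mem_replicate hbu]
    exact hle.1 u hu

-- counting in the flat list is a prefix-count over the groups
theorem pvFlat_cnt (nums : List Int) (t v : Int) :
    ∀ (lst : List Int), lst.Pairwise (· ≤ ·) →
      pvCnt (pvFlat lst nums) t v = pvCC lst nums (pvCnt lst t v) := by
  intro lst
  induction lst with
  | nil => intro _; simp [pvFlat, pvCnt, pvCC]
  | cons x tail ih =>
    intro hle
    rw [List.pairwise_cons] at hle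
    unfold pvFlat pvCnt
    rw [List.flatMap_cons, List.countP_append, List.countP_cons, List.countP_replicate]
    by_cases hx : v + x ≤ t
    · rw [if_pos (decide_eq_true hx), if_pos (decide_eq_true hx)]
      have h := ih hle.2
      unfold pvFlat pvCnt at h
      rw [h]
      unfold pvCC
      rw [List.take_succ_cons, List.map_cons, List.sum_cons]
    · have h0 : tail.countP (fun w => decide (v + w ≤ t)) = 0 := by
        rw [List.countP_eq_zero]
        intro a ha
        have := hle.1 a ha
        simp
        omega
      have hflat0 : (tail.flatMap (fun u => List.replicate (nums.count u) u)).countP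
          (fun y => decide (v + y ≤ t)) = 0 := by
        rw [List.countP_eq_zero]
        intro a ha
        rw [List.mem_flatMap] at ha
        obtain ⟨u, hu, hau⟩ := ha
        rw [List.eq_of_mem_replicate hau]
        have := hle.1 u hu
        simp
        omega
      rw [if_neg (by simpa using hx), if_neg (by simpa using hx), h0, hflat0, pvCC_zero]

-- geometric block: sum over j < c of 2^(N-1-j)
theorem pvGeom (c N : Nat) (h : c ≤ N) :
    ((List.range c).map (fun j => (2 : Int) ^ (N - 1 - j))).sum
      = 2 ^ (N - c) * (2 ^ c - 1) := by
  induction c with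
  | zero => simp
  | succ c ihc =>
    rw [List.range_succ, List.map_append, List.sum_append, ihc (by omega)]
    simp only [List.map_cons, List.map_nil, List.sum_cons, List.sum_nil]
    rw [show N - c = (N - (c + 1)) + 1 by omega, show N - 1 - c = N - (c + 1) by omega,
      pow_succ 2 (N - (c + 1)), pow_succ 2 c]
    ring


theorem pvFlat_getD (lst nums : List Int) {L : Nat} (hL : L < lst.length) {l : Nat}
    (h1 : pvCC lst nums L ≤ l) (h2 : l < pvCC lst nums (L + 1)) :
    (pvFlat lst nums).getD l 0 = lst.getD L 0 := by
  have hsplit : lst = lst.take L ++ lst[L] :: lst.drop (L + 1) := by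
    conv_lhs => rw [← List.take_append_drop L lst]
    rw [List.drop_eq_getElem_cons hL]
  have hlen : ((lst.take L).flatMap fun v => List.replicate (nums.count v) v).length
      = pvCC lst nums L := pvFlat_take_length lst nums L
  have hcc := pvCC_succ lst nums hL
  rw [List.getD_eq_getElem _ _ hL]
  unfold pvFlat
  conv_lhs => rw [hsplit]
  rw [List.flatMap_append, List.flatMap_cons]
  rw [List.getD_eq_getElem?_getD, List.getElem?_append_right (by omega)]
  rw [List.getElem?_append_left (by
    rw [List.length_replicate, List.getD_eq_getElem _ _ hL] at *
    omega)]
  rw [List.getElem?_replicate]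
  rw [if_pos (by rw [List.getD_eq_getElem _ _ hL] at *; omega)]
  rfl

-- the inner decrementing while loop lands exactly on pvCnt(lst, cur) - 1
theorem aInner_eq (lst : List Int) (t cur : Int) (hle : List.Pairwise (· ≤ ·) lst) :
    ∀ (m : Nat) (r : Int), (r + 1 - (pvCnt lst t cur : Int)).toNat ≤ m →
      1 ≤ pvCnt lst t cur → (pvCnt lst t cur : Int) - 1 ≤ r → r < (lst.length : Int) →
      aInner lst t cur r = (pvCnt lst t cur : Int) - 1 := by
  have hlen : pvCnt lst t cur ≤ lst.length := List.countP_le_length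
  intro m
  induction m with
  | zero =>
    intro r hm h1 h2 hr
    have hreq : r = (pvCnt lst t cur : Int) - 1 := by omega
    subst hreq
    have hrl : (0:Int) ≤ (pvCnt lst t cur : Int) - 1 := by omega
    have hget := PySem.List.pyGet?_eq_some_getElem lst hrl (by omega)
    rw [aInner, hget]
    have hchar := (countP_iff_lt hle cur t ((pvCnt lst t cur : Int) - 1).toNat (by omega)).mpr
      (by omega)
    rw [List.getD_eq_getElem _ _ (by omega : (((pvCnt lst t cur : Int) - 1).toNat < lst.length))] at hchar
    simp only [if_neg (by omega : ¬ (cur + lst[((pvCnt lst t cur : Int) - 1).toNat] > t))]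
  | succ m ih =>
    intro r hm h1 h2 hr
    rcases eq_or_lt_of_le h2 with heq | hlt
    · have hreq : r = (pvCnt lst t cur : Int) - 1 := by omega
      subst hreq
      exact ih _ (by omega) h1 h2 hr
    · have hr0 : (0:Int) ≤ r := by omega
      have hget := PySem.List.pyGet?_eq_some_getElem lst hr0 hr
      rw [aInner, hget]
      have hchar := countP_iff_lt hle cur t r.toNat (by omega)
      rw [List.getD_eq_getElem _ _ (by omega : r.toNat < lst.length)] at hchar
      have hnot : ¬ (r.toNat < pvCnt lst t cur) := by omega
      have hgt : cur + lst[r.toNat] > t := by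
        by_contra hc
        exact hnot ((by unfold pvCnt at *; exact hchar.mp (by omega)))
      simp only [if_pos hgt]
      exact ih (r - 1) (by omega) h1 (by omega) (by omega)

-- the prefix-count table A builds is pvCC(·+1) with a trailing 0
theorem pre_spec (lst nums : List Int) (record : PySem.Dict Int Int)
    (hrec : ∀ v, record.getD v 0 = (nums.count v : Int)) :
    (PySem.List.pyRange 0 (lst.length : Int) 1).foldl
      (fun pf i => PySem.List.pySetD pf i
        (PySem.List.pyGetD pf (i - 1) 0 + record.getD (PySem.List.pyGetD lst i 0) 0))
      (List.replicate (lst.length + 1) 0)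
    = (List.range lst.length).map (fun i => (pvCC lst nums (i + 1) : Int)) ++ [0] := by
  rw [PySem.List.pyRange_one, Int.sub_zero, Int.toNat_natCast, List.foldl_map]
  suffices h : ∀ m : Nat, m ≤ lst.length →
      (List.range m).foldl
        (fun pf (k : Nat) => PySem.List.pySetD pf ((0:Int) + k)
          (PySem.List.pyGetD pf (((0:Int) + k) - 1) 0
            + record.getD (PySem.List.pyGetD lst ((0:Int) + k) 0) 0))
        (List.replicate (lst.length + 1) 0)
      = (List.range m).map (fun i => (pvCC lst nums (i + 1) : Int))
          ++ List.replicate (lst.length + 1 - m) 0 by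
    have := h lst.length (le_refl _)
    rw [this, show lst.length + 1 - lst.length = 1 by omega]
    rfl
  intro m
  induction m with
  | zero => simp
  | succ m ihm =>
    intro hm
    rw [List.range_succ, List.foldl_append, ihm (by omega), List.foldl_cons, List.foldl_nil]
    have hmlen : ((List.range m).map (fun i => (pvCC lst nums (i + 1) : Int))).length = m := by
      simp
    -- the value read at index m-1 (index -1 when m = 0) is pvCC lst nums m
    have hread : PySem.List.pyGetD
        ((List.range m).map (fun i => (pvCC lst nums (i + 1) : Int))
          ++ List.replicate (lst.length + 1 - m) 0) (((0:Int) + m) - 1) 0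
        = (pvCC lst nums m : Int) := by
      cases m with
      | zero =>
        rw [show ((0:Int) + (0:Nat)) - 1 = -1 by simp]
        rw [show lst.length + 1 - 0 = lst.length + 1 from rfl]
        rw [List.replicate_succ']
        simp only [List.map_nil, List.range_zero, List.nil_append]
        simp [PySem.List.pyGetD, PySem.List.pyGet?_neg_one_append_singleton, pvCC_zero]
      | succ m' =>
        rw [show ((0:Int) + ((m' + 1 : Nat) : Int)) - 1 = ((m' : Nat) : Int) by push_cast; ring]
        rw [PySem.List.pyGetD_of_nonneg _ _ (by omega), Int.toNat_natCast]
        rw [List.getD_eq_getElem?_getD, List.getElem?_append_left (by omega),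
          List.getElem?_map, List.getElem?_range (by omega)]
        rfl
    rw [hread]
    rw [show (0:Int) + (m : Int) = (m : Int) by ring]
    rw [PySem.List.pyGetD_of_nonneg lst _ (by omega), Int.toNat_natCast, hrec]
    rw [PySem.List.pySetD_of_nonneg _ _ (by omega), Int.toNat_natCast]
    rw [List.set_append, if_neg (by omega)]
    rw [hmlen, Nat.sub_self]
    rw [show lst.length + 1 - m = (lst.length - m) + 1 by omega, List.replicate_succ,
      List.set_cons_zero]
    rw [List.map_append]
    simp only [List.map_cons, List.map_nil, List.append_assoc, List.singleton_append]
    rw [pvCC_succ lst nums (by omega)]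
    rw [show lst.length + 1 - (m + 1) = lst.length - m by omega]
    push_cast
    rfl

theorem pre_getD (lst nums : List Int) (i : Int) (h0 : 0 ≤ i) (h1 : i < (lst.length : Int)) :
    PySem.List.pyGetD
      ((List.range lst.length).map (fun i => (pvCC lst nums (i + 1) : Int)) ++ [0]) i 0
      = (pvCC lst nums (i.toNat + 1) : Int) := by
  rw [PySem.List.pyGetD_of_nonneg _ _ h0]
  rw [List.getD_eq_getElem?_getD, List.getElem?_append_left (by simp; omega),
    List.getElem?_map, List.getElem?_range (by omega)]
  rfl


theorem pvE_split (s : List Int) (t : Int) {a b : Nat} (hab : a ≤ b) (hb : b ≤ s.length) :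
    pvE s t a = ((List.range' a (b - a)).map (pvTerm s t)).sum + pvE s t b := by
  unfold pvE
  rw [show s.length - a = (b - a) + (s.length - b) by omega]
  rw [← List.range'_append_1, show a + (b - a) = b by omega]
  rw [List.map_append, List.sum_append]

-- sum of the flat contributions of group L equals A's per-group product
theorem pvGroupSum (lst nums : List Int) (t : Int) (s : List Int)
    (hflat : s = pvFlat lst nums) (hle : List.Pairwise (· ≤ ·) lst)
    {L : Nat} (hL : L < lst.length)
    (hKL : L + 1 ≤ pvCnt lst t (lst.getD L 0)) :
    ((List.range' (pvCC lst nums L) (nums.count (lst.getD L 0))).map (pvTerm s t)).sum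
      = 2 ^ (pvCC lst nums (pvCnt lst t (lst.getD L 0)) - pvCC lst nums (L + 1))
        * (2 ^ (nums.count (lst.getD L 0)) - 1) := by
  have hcc := pvCC_succ lst nums hL
  have hmono := pvCC_mono lst nums hKL
  have hterm : ∀ j ∈ List.range (nums.count (lst.getD L 0)),
      pvTerm s t (pvCC lst nums L + j)
        = 2 ^ ((pvCC lst nums (pvCnt lst t (lst.getD L 0)) - pvCC lst nums L) - 1 - j) := by
    intro j hj
    rw [List.mem_range] at hj
    have hl2 : pvCC lst nums L + j < pvCC lst nums (L + 1) := by omega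
    have hval : s.getD (pvCC lst nums L + j) 0 = lst.getD L 0 := by
      rw [hflat]; exact pvFlat_getD lst nums hL (by omega) hl2
    unfold pvTerm
    rw [hval, hflat, pvFlat_cnt nums t (lst.getD L 0) lst hle]
    rw [if_pos (by omega)]
    congr 1
    omega
  rw [List.range'_eq_map_range, List.map_map]
  simp only [Function.comp_def]
  rw [List.map_congr_left hterm]
  rw [pvGeom (nums.count (lst.getD L 0))
      (pvCC lst nums (pvCnt lst t (lst.getD L 0)) - pvCC lst nums L) (by omega)]
  congr 2
  omega

-- A's outer loop, entered with the group right-pointer at least pvCnt(lst[L])-1, returns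
-- (ret + remaining flat contributions) mod pvP
theorem aLoop_spec (lst nums s : List Int) (record : PySem.Dict Int Int) (pre : List Int)
    (t : Int)
    (hle : List.Pairwise (· ≤ ·) lst)
    (hflat : s = pvFlat lst nums)
    (hs : List.Pairwise (· ≤ ·) s)
    (hrec : ∀ v, record.getD v 0 = (nums.count v : Int))
    (hcpos : ∀ v ∈ lst, 1 ≤ nums.count v)
    (hpre : ∀ i : Int, 0 ≤ i → i < (lst.length : Int) →
        PySem.List.pyGetD pre i 0 = (pvCC lst nums (i.toNat + 1) : Int)) :
    ∀ (m L : Nat) (r ret : Int), (r + 1 - (L : Int)).toNat ≤ m →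
      L ≤ lst.length → r < (lst.length : Int) → (L : Int) ≤ r + 1 →
      (L < lst.length → (pvCnt lst t (lst.getD L 0) : Int) - 1 ≤ r) →
      ret % pvP = ret →
      aLoop lst record pre t (L : Int) r ret = (ret + pvE s t (pvCC lst nums L)) % pvP := by
  have hslen : s.length = pvCC lst nums lst.length := by
    rw [hflat]; exact pvFlat_length lst nums
  have hzero : ∀ L : Nat, (L < lst.length → pvCnt lst t (lst.getD L 0) ≤ L) →
      pvE s t (pvCC lst nums L) = 0 := by
    intro L hKL
    rcases Nat.lt_or_ge L lst.length with hlt | hge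
    · have hc1 : 1 ≤ nums.count (lst.getD L 0) := by
        apply hcpos
        rw [List.getD_eq_getElem _ _ hlt]
        exact List.getElem_mem hlt
      have hcc := pvCC_succ lst nums hlt
      have hlt2 : pvCC lst nums L < s.length := by
        rw [hslen]
        have := pvCC_mono lst nums (show L + 1 ≤ lst.length by omega)
        omega
      apply pvE_zero_from hs t hlt2
      have hval : s.getD (pvCC lst nums L) 0 = lst.getD L 0 := by
        rw [hflat]; exact pvFlat_getD lst nums hlt (le_refl _) (by omega)
      rw [hval, hflat, pvFlat_cnt nums t _ lst hle]
      exact pvCC_mono lst nums (hKL hlt)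
    · unfold pvE
      rw [hslen, pvCC_top lst nums hge, Nat.sub_self]
      simp
  intro m
  induction m with
  | zero =>
    intro L r ret hm hLlen hr hlr hinv hret
    rw [aLoop, dif_neg (by omega)]
    rw [hzero L (fun hlt => by have := hinv hlt; omega), add_zero, hret]
  | succ m ih =>
    intro L r ret hm hLlen hr hlr hinv hret
    rw [aLoop]
    by_cases hguard : (L : Int) ≤ r
    · rw [dif_pos hguard]
      have hLlt : L < lst.length := by omega
      have hcur : PySem.List.pyGetD lst (L : Int) 0 = lst.getD L 0 := by
        rw [PySem.List.pyGetD_of_nonneg _ _ (by omega), Int.toNat_natCast]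
      simp only [hcur]
      by_cases hbreak : lst.getD L 0 + lst.getD L 0 > t
      · rw [if_pos hbreak]
        rw [hzero L (fun hlt => by
          by_contra hc
          have := (countP_iff_lt hle (lst.getD L 0) t L (by omega)).mpr (by omega)
          omega), add_zero, hret]
      · rw [if_neg hbreak]
        have hK1 : L < pvCnt lst t (lst.getD L 0) :=
          (countP_iff_lt hle (lst.getD L 0) t L (by omega)).mp (by omega)
        have hKlen : pvCnt lst t (lst.getD L 0) ≤ lst.length := List.countP_le_length
        have hc1 : 1 ≤ nums.count (lst.getD L 0) := by
          apply hcpos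
          rw [List.getD_eq_getElem _ _ hLlt]
          exact List.getElem_mem hLlt
        have hcc := pvCC_succ lst nums hLlt
        have hccmono := pvCC_mono lst nums (show L + 1 ≤ pvCnt lst t (lst.getD L 0) by omega)
        have hcctop := pvCC_mono lst nums hKlen
        have hinner : aInner lst t (lst.getD L 0) r = (pvCnt lst t (lst.getD L 0) : Int) - 1 :=
          aInner_eq lst t (lst.getD L 0) hle
            ((r + 1 - (pvCnt lst t (lst.getD L 0) : Int)).toNat) r (le_refl _)
            (by omega) (by have := hinv hLlt; omega) hr
        rw [hinner]
        rw [hpre ((pvCnt lst t (lst.getD L 0) : Int) - 1) (by omega) (by omega)]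
        rw [show (((pvCnt lst t (lst.getD L 0) : Int) - 1).toNat + 1)
            = pvCnt lst t (lst.getD L 0) by omega]
        rw [hpre (L : Int) (by omega) (by omega), Int.toNat_natCast]
        rw [hrec (lst.getD L 0), Int.toNat_natCast]
        rw [show ((pvCC lst nums (pvCnt lst t (lst.getD L 0)) : Int)
              - (pvCC lst nums (L + 1) : Int)).toNat
            = pvCC lst nums (pvCnt lst t (lst.getD L 0)) - pvCC lst nums (L + 1) by omega]
        rw [PySem.Int.powMod_eq, PySem.Int.powMod_eq,
          PySem.Int.mod_eq_emod_of_pos pvP_pos, PySem.Int.mod_eq_emod_of_pos pvP_pos,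
          PySem.Int.mod_eq_emod_of_pos pvP_pos]
        rw [show ((L : Int) + 1) = (((L + 1 : Nat) : Int)) by push_cast; ring]
        rw [ih (L + 1) ((pvCnt lst t (lst.getD L 0) : Int) - 1) _
          (by omega) (by omega) (by omega) (by omega)
          (fun hlt1 => by
            have hmono2 : pvCnt lst t (lst.getD (L + 1) 0) ≤ pvCnt lst t (lst.getD L 0) := by
              apply pvCnt_anti
              exact pvGetD_mono hle (show L ≤ L + 1 by omega) (by omega)
            omega)
          (Int.emod_emod _ _)]
        rw [pvMod_step2]
        rw [pvE_split s t (show pvCC lst nums L ≤ pvCC lst nums (L + 1) by omega)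
          (by rw [hslen]; exact pvCC_mono lst nums (by omega))]
        rw [show pvCC lst nums (L + 1) - pvCC lst nums L = nums.count (lst.getD L 0) by omega]
        rw [pvGroupSum lst nums t s hflat hle hLlt (by omega)]
    · rw [dif_neg hguard]
      rw [hzero L (fun hlt => by have := hinv hlt; omega), add_zero, hret]

theorem a_eq (nums : List Int) (target : Int) :
    numSubseq nums target
      = pvE (PySem.List.sorted nums (fun x => x) false) target 0 % pvP := by
  simp only [numSubseq]
  have hrec : ∀ v : Int,
      (nums.foldl (fun d item => d.insert item (d.getD item 0 + 1))
        (PySem.Dict.empty : PySem.Dict Int Int)).getD v 0 = (nums.count v : Int) := by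
    intro v
    rw [PySem.Dict.getD_foldl_insert_add_one, PySem.Dict.getD_empty]
    ring
  have hkeys : (nums.foldl (fun d item => d.insert item (d.getD item 0 + 1))
      (PySem.Dict.empty : PySem.Dict Int Int)).keys = PySem.Set.ofList nums := by
    rw [PySem.Dict.keys_foldl_insert, PySem.Dict.keys_empty, PySem.Set.update_nil_left]
  rw [hkeys]
  set lst := PySem.List.sorted (PySem.Set.ofList nums) (fun x => x) false with hlst
  have hlt : List.Pairwise (· < ·) lst := by
    simpa using PySem.List.sorted_ofList_pairwise_lt nums
  have hle : List.Pairwise (· ≤ ·) lst := hlt.imp le_of_lt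
  have hnd : lst.Nodup := List.Pairwise.imp ne_of_lt hlt
  have hmem : ∀ v, v ∈ lst ↔ v ∈ nums := by
    intro v
    rw [hlst, PySem.List.mem_sorted, PySem.Set.mem_ofList]
  have hflat : PySem.List.sorted nums (fun x => x) false = pvFlat lst nums :=
    PySem.List.sorted_id_eq_of_perm_of_pairwise nums (pvFlat lst nums)
      (pvFlat_perm lst nums hnd hmem) (pvFlat_pairwise lst nums hle)
  have hs : List.Pairwise (· ≤ ·) (PySem.List.sorted nums (fun x => x) false) := by
    simpa using PySem.List.sorted_pairwise nums (fun x => x)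
  have hcpos : ∀ v ∈ lst, 1 ≤ nums.count v := by
    intro v hv
    exact List.count_pos_iff.mpr ((hmem v).mp hv)
  rw [pre_spec lst nums _ hrec]
  have h0 := aLoop_spec lst nums (PySem.List.sorted nums (fun x => x) false) _ _ target
    hle hflat hs hrec hcpos (fun i h0 h1 => pre_getD lst nums i h0 h1)
    lst.length 0 ((lst.length : Int) - 1) 0
    (by omega) (by omega) (by omega) (by omega)
    (fun _ => by have : pvCnt lst target (lst.getD 0 0) ≤ lst.length := List.countP_le_length
                 omega)
    (by norm_num)
  rw [show ((0 : Nat) : Int) = (0 : Int) by norm_num] at h0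
  rw [h0, pvCC_zero, zero_add]

-- ===== VERDICT (by name: the statement is the Claim_ definition above) =====
theorem numSubseq_spec : Claim_equal_numSubseq := by
  intro nums target _
  unfold Spec_numSubseq
  rw [a_eq, alt_eq]
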